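-- pv_equiv track=rewrite | github.com/gbugi/HF-codingstudy | 2주차/yeonjin/programmers2_2.py | solution
-- ===== SOURCE A (Python) =====
-- def solution(survey, choices):
--     answer = ''
--
--     dict = {'RT':0,'CF':0,'JM':0,'AN':0}
--
--     for i, s in enumerate(survey):
--         score = choices[i] - 4
--         if s in dict :
--             dict[s] += score
--         else :
--             s = s[::-1]
--             dict[s] -= score
--
--     for k, v in dict.items():
--         if v <= 0:
--             result = k[0]
--         else:
--             result = k[1]
--         answer += result
--     return answer
-- ===== SOURCE B (Python) =====
-- def solution(survey, choices):
--     # Per-letter voting tally instead of signed sums with reverse-key lookup.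
--     tally = {c: 0 for c in 'RTCFJMAN'}
--     for s, c in zip(survey, choices):
--         letter = s[0] if c <= 4 else s[1]
--         tally[letter] += abs(c - 4)
--     return ''.join(p[0] if tally[p[0]] >= tally[p[1]] else p[1]
--                    for p in ('RT', 'CF', 'JM', 'AN'))
-- ===== Notes on version B (the rewrite author's own statement) =====
-- stated objective: alternative
-- what changed: B replaces A's signed-score dict keyed by the four pair strings (with a string-reversal lookup for swapped keys) by a per-letter voting tally: each answer adds abs(choices[i]-4) to the favored letter, and the result compares the two letters of each pair directly.
import Mathlib
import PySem

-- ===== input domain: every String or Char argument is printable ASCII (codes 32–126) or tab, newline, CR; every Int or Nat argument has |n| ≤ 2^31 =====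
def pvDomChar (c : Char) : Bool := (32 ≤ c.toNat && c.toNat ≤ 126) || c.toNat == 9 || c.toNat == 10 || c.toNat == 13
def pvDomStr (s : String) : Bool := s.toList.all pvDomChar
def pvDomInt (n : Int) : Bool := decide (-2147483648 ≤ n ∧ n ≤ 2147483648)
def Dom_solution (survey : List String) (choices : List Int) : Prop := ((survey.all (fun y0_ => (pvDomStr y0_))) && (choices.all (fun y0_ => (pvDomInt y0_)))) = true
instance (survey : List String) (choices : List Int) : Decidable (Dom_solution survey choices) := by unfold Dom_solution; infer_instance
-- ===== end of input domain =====

-- B replaces A's signed-sum dict with reverse-key lookup by a per-letter voting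
-- tally read out by comparing the two letters of each pair (objective: alternative).

-- ===== PORT A =====
-- loop body of A's first for-loop: s is survey[i], c is choices[i]
def pvStepA (d : PySem.Dict String Int) (s : String) (c : Int) : PySem.Dict String Int :=
  let score := c - 4
  if d.contains s then d.modify s 0 (· + score)          -- dict[s] += score (s present)
  else
    let s' := (PySem.Str.slice? s none none (-1)).getD ""  -- s = s[::-1]
    d.modify s' 0 (· - score)                             -- dict[s] -= score (KeyError excluded by Pre_)

-- A's second for-loop: answer += k[0] / k[1]
def pvReadA (d : PySem.Dict String Int) : String :=
  String.ofList (d.items.foldl (fun ans kv =>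
    ans ++ [if kv.2 ≤ 0 then (PySem.Str.pyGet? kv.1 0).getD ' '
            else (PySem.Str.pyGet? kv.1 1).getD ' ']) [])

def solution (survey : List String) (choices : List Int) : String :=
  pvReadA ((PySem.List.enumerate survey 0).foldl
    (fun d p => pvStepA d p.2 (PySem.List.pyGetD choices p.1 0))
    (PySem.Dict.ofList [("RT", 0), ("CF", 0), ("JM", 0), ("AN", 0)]))

-- ===== PORT B =====
-- loop body of B: favored letter gets abs(c-4) votes
def pvStepB (t : PySem.Dict Char Int) (p : String × Int) : PySem.Dict Char Int :=
  let letter := if p.2 ≤ 4 then (PySem.Str.pyGet? p.1 0).getD ' '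
                else (PySem.Str.pyGet? p.1 1).getD ' '
  t.modify letter 0 (· + |p.2 - 4|)

-- B's join: per pair, first letter iff its tally is ≥ the second's
def pvReadB (t : PySem.Dict Char Int) : String :=
  String.ofList ((["RT", "CF", "JM", "AN"] : List String).map (fun pr =>
    if t.getD ((PySem.Str.pyGet? pr 0).getD ' ') 0 ≥ t.getD ((PySem.Str.pyGet? pr 1).getD ' ') 0
    then (PySem.Str.pyGet? pr 0).getD ' ' else (PySem.Str.pyGet? pr 1).getD ' '))

def solution_alt (survey : List String) (choices : List Int) : String :=
  pvReadB ((survey.zip choices).foldl pvStepB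
    (PySem.Dict.ofList [('R', 0), ('T', 0), ('C', 0), ('F', 0), ('J', 0), ('M', 0), ('A', 0), ('N', 0)]))

-- ===== PRECONDITION & SPEC =====
-- Pre_ is exactly where A returns: enough choices for every answer, and every
-- survey entry is one of the eight MBTI pair strings (otherwise A raises
-- IndexError / KeyError).
def Pre_solution (survey : List String) (choices : List Int) : Prop :=
  survey.length ≤ choices.length ∧
  ∀ s ∈ survey, s ∈ (["RT", "TR", "CF", "FC", "JM", "MJ", "AN", "NA"] : List String)
instance (survey : List String) (choices : List Int) : Decidable (Pre_solution survey choices) := by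
  unfold Pre_solution; infer_instance

def pvWitness_solution : List String × List Int := (["RT", "MJ", "NA"], [1, 5, 4])

def Spec_solution (survey : List String) (choices : List Int) (out : String) : Prop := out = solution_alt survey choices
instance (survey : List String) (choices : List Int) (out : String) : Decidable (Spec_solution survey choices out) := by unfold Spec_solution; infer_instance

-- ===== CLAIM (what is proved, stated in full; the proofs are below) =====
def Claim_equal_solution : Prop := ∀ (survey : List String) (choices : List Int), Dom_solution survey choices → Pre_solution survey choices → Spec_solution survey choices (solution survey choices)

-- ===== LEMMAS AND PROOFS =====

-- A's enumerate/choices[i] loop is a fold over the zip, once every index is in range.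
theorem pvEnumFold {σ α β : Type} (f : σ → α → β → σ) (dflt : β) :
    ∀ (sv : List α) (ch : List β) (n : ℕ) (init : σ), sv.length + n ≤ ch.length →
    (PySem.List.enumerate sv (n : Int)).foldl
        (fun st p => f st p.2 (PySem.List.pyGetD ch p.1 dflt)) init
      = (sv.zip (ch.drop n)).foldl (fun st p => f st p.1 p.2) init := by
  intro sv
  induction sv with
  | nil => intro ch n init _; simp [PySem.List.enumerate_nil]
  | cons a sv ih =>
    intro ch n init h
    have hn : n < ch.length := by simp at h; omega
    have hdrop : ch.drop n = ch[n] :: ch.drop (n + 1) := (List.getElem_cons_drop hn).symm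
    rw [PySem.List.enumerate_cons, hdrop]
    simp only [List.foldl_cons, List.zip_cons_cons]
    rw [show ((n : Int) + 1) = ((n + 1 : ℕ) : Int) by push_cast; ring]
    rw [PySem.List.pyGetD_natCast, List.getD_eq_getElem _ _ hn]
    exact ih ch (n + 1) _ (by simp at h ⊢; omega)

theorem pvEnumFold0 {σ α β : Type} (f : σ → α → β → σ) (dflt : β)
    (sv : List α) (ch : List β) (init : σ) (h : sv.length ≤ ch.length) :
    (PySem.List.enumerate sv (0 : Int)).foldl
        (fun st p => f st p.2 (PySem.List.pyGetD ch p.1 dflt)) init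
      = (sv.zip ch).foldl (fun st p => f st p.1 p.2) init := by
  have := pvEnumFold f dflt sv ch 0 init (by omega)
  simpa using this

theorem pvA_RT (a b c d v : Int) :
    pvStepA (PySem.Dict.mk [("RT", a), ("CF", b), ("JM", c), ("AN", d)]) "RT" v
    = PySem.Dict.mk [("RT", a + (v - 4)), ("CF", b), ("JM", c), ("AN", d)] := rfl
theorem pvA_TR (a b c d v : Int) :
    pvStepA (PySem.Dict.mk [("RT", a), ("CF", b), ("JM", c), ("AN", d)]) "TR" v
    = PySem.Dict.mk [("RT", a - (v - 4)), ("CF", b), ("JM", c), ("AN", d)] := rfl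
theorem pvA_CF (a b c d v : Int) :
    pvStepA (PySem.Dict.mk [("RT", a), ("CF", b), ("JM", c), ("AN", d)]) "CF" v
    = PySem.Dict.mk [("RT", a), ("CF", b + (v - 4)), ("JM", c), ("AN", d)] := rfl
theorem pvA_FC (a b c d v : Int) :
    pvStepA (PySem.Dict.mk [("RT", a), ("CF", b), ("JM", c), ("AN", d)]) "FC" v
    = PySem.Dict.mk [("RT", a), ("CF", b - (v - 4)), ("JM", c), ("AN", d)] := rfl
theorem pvA_JM (a b c d v : Int) :
    pvStepA (PySem.Dict.mk [("RT", a), ("CF", b), ("JM", c), ("AN", d)]) "JM" v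
    = PySem.Dict.mk [("RT", a), ("CF", b), ("JM", c + (v - 4)), ("AN", d)] := rfl
theorem pvA_MJ (a b c d v : Int) :
    pvStepA (PySem.Dict.mk [("RT", a), ("CF", b), ("JM", c), ("AN", d)]) "MJ" v
    = PySem.Dict.mk [("RT", a), ("CF", b), ("JM", c - (v - 4)), ("AN", d)] := rfl
theorem pvA_AN (a b c d v : Int) :
    pvStepA (PySem.Dict.mk [("RT", a), ("CF", b), ("JM", c), ("AN", d)]) "AN" v
    = PySem.Dict.mk [("RT", a), ("CF", b), ("JM", c), ("AN", d + (v - 4))] := rfl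
theorem pvA_NA (a b c d v : Int) :
    pvStepA (PySem.Dict.mk [("RT", a), ("CF", b), ("JM", c), ("AN", d)]) "NA" v
    = PySem.Dict.mk [("RT", a), ("CF", b), ("JM", c), ("AN", d - (v - 4))] := rfl
theorem pvB_RT_le (r t f g j m x y v : Int) (hv : v ≤ 4) :
    pvStepB (PySem.Dict.mk [('R', r), ('T', t), ('C', f), ('F', g), ('J', j), ('M', m), ('A', x), ('N', y)]) ("RT", v)
    = PySem.Dict.mk [('R', r + |v - 4|), ('T', t), ('C', f), ('F', g), ('J', j), ('M', m), ('A', x), ('N', y)] := by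
  simp only [pvStepB, if_pos hv]; rfl
theorem pvB_RT_gt (r t f g j m x y v : Int) (hv : ¬ v ≤ 4) :
    pvStepB (PySem.Dict.mk [('R', r), ('T', t), ('C', f), ('F', g), ('J', j), ('M', m), ('A', x), ('N', y)]) ("RT", v)
    = PySem.Dict.mk [('R', r), ('T', t + |v - 4|), ('C', f), ('F', g), ('J', j), ('M', m), ('A', x), ('N', y)] := by
  simp only [pvStepB, if_neg hv]; rfl
theorem pvB_TR_le (r t f g j m x y v : Int) (hv : v ≤ 4) :
    pvStepB (PySem.Dict.mk [('R', r), ('T', t), ('C', f), ('F', g), ('J', j), ('M', m), ('A', x), ('N', y)]) ("TR", v)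
    = PySem.Dict.mk [('R', r), ('T', t + |v - 4|), ('C', f), ('F', g), ('J', j), ('M', m), ('A', x), ('N', y)] := by
  simp only [pvStepB, if_pos hv]; rfl
theorem pvB_TR_gt (r t f g j m x y v : Int) (hv : ¬ v ≤ 4) :
    pvStepB (PySem.Dict.mk [('R', r), ('T', t), ('C', f), ('F', g), ('J', j), ('M', m), ('A', x), ('N', y)]) ("TR", v)
    = PySem.Dict.mk [('R', r + |v - 4|), ('T', t), ('C', f), ('F', g), ('J', j), ('M', m), ('A', x), ('N', y)] := by
  simp only [pvStepB, if_neg hv]; rfl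
theorem pvB_CF_le (r t f g j m x y v : Int) (hv : v ≤ 4) :
    pvStepB (PySem.Dict.mk [('R', r), ('T', t), ('C', f), ('F', g), ('J', j), ('M', m), ('A', x), ('N', y)]) ("CF", v)
    = PySem.Dict.mk [('R', r), ('T', t), ('C', f + |v - 4|), ('F', g), ('J', j), ('M', m), ('A', x), ('N', y)] := by
  simp only [pvStepB, if_pos hv]; rfl
theorem pvB_CF_gt (r t f g j m x y v : Int) (hv : ¬ v ≤ 4) :
    pvStepB (PySem.Dict.mk [('R', r), ('T', t), ('C', f), ('F', g), ('J', j), ('M', m), ('A', x), ('N', y)]) ("CF", v)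
    = PySem.Dict.mk [('R', r), ('T', t), ('C', f), ('F', g + |v - 4|), ('J', j), ('M', m), ('A', x), ('N', y)] := by
  simp only [pvStepB, if_neg hv]; rfl
theorem pvB_FC_le (r t f g j m x y v : Int) (hv : v ≤ 4) :
    pvStepB (PySem.Dict.mk [('R', r), ('T', t), ('C', f), ('F', g), ('J', j), ('M', m), ('A', x), ('N', y)]) ("FC", v)
    = PySem.Dict.mk [('R', r), ('T', t), ('C', f), ('F', g + |v - 4|), ('J', j), ('M', m), ('A', x), ('N', y)] := by
  simp only [pvStepB, if_pos hv]; rfl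
theorem pvB_FC_gt (r t f g j m x y v : Int) (hv : ¬ v ≤ 4) :
    pvStepB (PySem.Dict.mk [('R', r), ('T', t), ('C', f), ('F', g), ('J', j), ('M', m), ('A', x), ('N', y)]) ("FC", v)
    = PySem.Dict.mk [('R', r), ('T', t), ('C', f + |v - 4|), ('F', g), ('J', j), ('M', m), ('A', x), ('N', y)] := by
  simp only [pvStepB, if_neg hv]; rfl
theorem pvB_JM_le (r t f g j m x y v : Int) (hv : v ≤ 4) :
    pvStepB (PySem.Dict.mk [('R', r), ('T', t), ('C', f), ('F', g), ('J', j), ('M', m), ('A', x), ('N', y)]) ("JM", v)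
    = PySem.Dict.mk [('R', r), ('T', t), ('C', f), ('F', g), ('J', j + |v - 4|), ('M', m), ('A', x), ('N', y)] := by
  simp only [pvStepB, if_pos hv]; rfl
theorem pvB_JM_gt (r t f g j m x y v : Int) (hv : ¬ v ≤ 4) :
    pvStepB (PySem.Dict.mk [('R', r), ('T', t), ('C', f), ('F', g), ('J', j), ('M', m), ('A', x), ('N', y)]) ("JM", v)
    = PySem.Dict.mk [('R', r), ('T', t), ('C', f), ('F', g), ('J', j), ('M', m + |v - 4|), ('A', x), ('N', y)] := by
  simp only [pvStepB, if_neg hv]; rfl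
theorem pvB_MJ_le (r t f g j m x y v : Int) (hv : v ≤ 4) :
    pvStepB (PySem.Dict.mk [('R', r), ('T', t), ('C', f), ('F', g), ('J', j), ('M', m), ('A', x), ('N', y)]) ("MJ", v)
    = PySem.Dict.mk [('R', r), ('T', t), ('C', f), ('F', g), ('J', j), ('M', m + |v - 4|), ('A', x), ('N', y)] := by
  simp only [pvStepB, if_pos hv]; rfl
theorem pvB_MJ_gt (r t f g j m x y v : Int) (hv : ¬ v ≤ 4) :
    pvStepB (PySem.Dict.mk [('R', r), ('T', t), ('C', f), ('F', g), ('J', j), ('M', m), ('A', x), ('N', y)]) ("MJ", v)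
    = PySem.Dict.mk [('R', r), ('T', t), ('C', f), ('F', g), ('J', j + |v - 4|), ('M', m), ('A', x), ('N', y)] := by
  simp only [pvStepB, if_neg hv]; rfl
theorem pvB_AN_le (r t f g j m x y v : Int) (hv : v ≤ 4) :
    pvStepB (PySem.Dict.mk [('R', r), ('T', t), ('C', f), ('F', g), ('J', j), ('M', m), ('A', x), ('N', y)]) ("AN", v)
    = PySem.Dict.mk [('R', r), ('T', t), ('C', f), ('F', g), ('J', j), ('M', m), ('A', x + |v - 4|), ('N', y)] := by
  simp only [pvStepB, if_pos hv]; rfl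
theorem pvB_AN_gt (r t f g j m x y v : Int) (hv : ¬ v ≤ 4) :
    pvStepB (PySem.Dict.mk [('R', r), ('T', t), ('C', f), ('F', g), ('J', j), ('M', m), ('A', x), ('N', y)]) ("AN", v)
    = PySem.Dict.mk [('R', r), ('T', t), ('C', f), ('F', g), ('J', j), ('M', m), ('A', x), ('N', y + |v - 4|)] := by
  simp only [pvStepB, if_neg hv]; rfl
theorem pvB_NA_le (r t f g j m x y v : Int) (hv : v ≤ 4) :
    pvStepB (PySem.Dict.mk [('R', r), ('T', t), ('C', f), ('F', g), ('J', j), ('M', m), ('A', x), ('N', y)]) ("NA", v)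
    = PySem.Dict.mk [('R', r), ('T', t), ('C', f), ('F', g), ('J', j), ('M', m), ('A', x), ('N', y + |v - 4|)] := by
  simp only [pvStepB, if_pos hv]; rfl
theorem pvB_NA_gt (r t f g j m x y v : Int) (hv : ¬ v ≤ 4) :
    pvStepB (PySem.Dict.mk [('R', r), ('T', t), ('C', f), ('F', g), ('J', j), ('M', m), ('A', x), ('N', y)]) ("NA", v)
    = PySem.Dict.mk [('R', r), ('T', t), ('C', f), ('F', g), ('J', j), ('M', m), ('A', x + |v - 4|), ('N', y)] := by
  simp only [pvStepB, if_neg hv]; rfl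

theorem pvMain :
    ∀ (ps : List (String × Int)) (a b c d r t f g j m x y : Int),
    (∀ p ∈ ps, p.1 ∈ (["RT", "TR", "CF", "FC", "JM", "MJ", "AN", "NA"] : List String)) →
    a = t - r → b = g - f → c = m - j → d = y - x →
    pvReadA (ps.foldl (fun st p => pvStepA st p.1 p.2)
        (PySem.Dict.mk [("RT", a), ("CF", b), ("JM", c), ("AN", d)]))
      = pvReadB (ps.foldl pvStepB
        (PySem.Dict.mk [('R', r), ('T', t), ('C', f), ('F', g), ('J', j), ('M', m), ('A', x), ('N', y)])) := by
  intro ps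
  induction ps with
  | nil =>
    intro a b c d r t f g j m x y _ ha hb hc hd
    subst ha hb hc hd
    simp only [List.foldl_nil]
    simp [pvReadA, pvReadB, PySem.Dict.getD, PySem.Dict.get?, PySem.Str.pyGet?, List.foldl]
  | cons p ps ih =>
    intro a b c d r t f g j m x y hmem ha hb hc hd
    obtain ⟨s, v⟩ := p
    have hs := hmem (s, v) (List.mem_cons_self)
    have hrest : ∀ q ∈ ps, q.1 ∈ (["RT", "TR", "CF", "FC", "JM", "MJ", "AN", "NA"] : List String) :=
      fun q hq => hmem q (List.mem_cons_of_mem _ hq)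
    simp only [List.mem_cons, List.not_mem_nil, or_false] at hs
    by_cases hv : v ≤ 4
    · have habs : |v - 4| = 4 - v := by rw [abs_of_nonpos (show v - 4 ≤ 0 by omega)]; ring
      rcases hs with rfl | rfl | rfl | rfl | rfl | rfl | rfl | rfl
      · rw [List.foldl_cons, List.foldl_cons, pvA_RT, pvB_RT_le _ _ _ _ _ _ _ _ _ hv]
        exact ih _ _ _ _ _ _ _ _ _ _ _ _ hrest (by rw [habs]; omega) (by omega) (by omega) (by omega)
      · rw [List.foldl_cons, List.foldl_cons, pvA_TR, pvB_TR_le _ _ _ _ _ _ _ _ _ hv]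
        exact ih _ _ _ _ _ _ _ _ _ _ _ _ hrest (by rw [habs]; omega) (by omega) (by omega) (by omega)
      · rw [List.foldl_cons, List.foldl_cons, pvA_CF, pvB_CF_le _ _ _ _ _ _ _ _ _ hv]
        exact ih _ _ _ _ _ _ _ _ _ _ _ _ hrest (by omega) (by rw [habs]; omega) (by omega) (by omega)
      · rw [List.foldl_cons, List.foldl_cons, pvA_FC, pvB_FC_le _ _ _ _ _ _ _ _ _ hv]
        exact ih _ _ _ _ _ _ _ _ _ _ _ _ hrest (by omega) (by rw [habs]; omega) (by omega) (by omega)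
      · rw [List.foldl_cons, List.foldl_cons, pvA_JM, pvB_JM_le _ _ _ _ _ _ _ _ _ hv]
        exact ih _ _ _ _ _ _ _ _ _ _ _ _ hrest (by omega) (by omega) (by rw [habs]; omega) (by omega)
      · rw [List.foldl_cons, List.foldl_cons, pvA_MJ, pvB_MJ_le _ _ _ _ _ _ _ _ _ hv]
        exact ih _ _ _ _ _ _ _ _ _ _ _ _ hrest (by omega) (by omega) (by rw [habs]; omega) (by omega)
      · rw [List.foldl_cons, List.foldl_cons, pvA_AN, pvB_AN_le _ _ _ _ _ _ _ _ _ hv]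
        exact ih _ _ _ _ _ _ _ _ _ _ _ _ hrest (by omega) (by omega) (by omega) (by rw [habs]; omega)
      · rw [List.foldl_cons, List.foldl_cons, pvA_NA, pvB_NA_le _ _ _ _ _ _ _ _ _ hv]
        exact ih _ _ _ _ _ _ _ _ _ _ _ _ hrest (by omega) (by omega) (by omega) (by rw [habs]; omega)
    · have habs : |v - 4| = v - 4 := abs_of_nonneg (show (0:Int) ≤ v - 4 by omega)
      rcases hs with rfl | rfl | rfl | rfl | rfl | rfl | rfl | rfl
      · rw [List.foldl_cons, List.foldl_cons, pvA_RT, pvB_RT_gt _ _ _ _ _ _ _ _ _ hv]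
        exact ih _ _ _ _ _ _ _ _ _ _ _ _ hrest (by rw [habs]; omega) (by omega) (by omega) (by omega)
      · rw [List.foldl_cons, List.foldl_cons, pvA_TR, pvB_TR_gt _ _ _ _ _ _ _ _ _ hv]
        exact ih _ _ _ _ _ _ _ _ _ _ _ _ hrest (by rw [habs]; omega) (by omega) (by omega) (by omega)
      · rw [List.foldl_cons, List.foldl_cons, pvA_CF, pvB_CF_gt _ _ _ _ _ _ _ _ _ hv]
        exact ih _ _ _ _ _ _ _ _ _ _ _ _ hrest (by omega) (by rw [habs]; omega) (by omega) (by omega)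
      · rw [List.foldl_cons, List.foldl_cons, pvA_FC, pvB_FC_gt _ _ _ _ _ _ _ _ _ hv]
        exact ih _ _ _ _ _ _ _ _ _ _ _ _ hrest (by omega) (by rw [habs]; omega) (by omega) (by omega)
      · rw [List.foldl_cons, List.foldl_cons, pvA_JM, pvB_JM_gt _ _ _ _ _ _ _ _ _ hv]
        exact ih _ _ _ _ _ _ _ _ _ _ _ _ hrest (by omega) (by omega) (by rw [habs]; omega) (by omega)
      · rw [List.foldl_cons, List.foldl_cons, pvA_MJ, pvB_MJ_gt _ _ _ _ _ _ _ _ _ hv]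
        exact ih _ _ _ _ _ _ _ _ _ _ _ _ hrest (by omega) (by omega) (by rw [habs]; omega) (by omega)
      · rw [List.foldl_cons, List.foldl_cons, pvA_AN, pvB_AN_gt _ _ _ _ _ _ _ _ _ hv]
        exact ih _ _ _ _ _ _ _ _ _ _ _ _ hrest (by omega) (by omega) (by omega) (by rw [habs]; omega)
      · rw [List.foldl_cons, List.foldl_cons, pvA_NA, pvB_NA_gt _ _ _ _ _ _ _ _ _ hv]
        exact ih _ _ _ _ _ _ _ _ _ _ _ _ hrest (by omega) (by omega) (by omega) (by rw [habs]; omega)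

-- ===== VERDICT (by name: the statement is the Claim_ definition above) =====
theorem solution_spec : Claim_equal_solution := by
  intro survey choices _ hpre
  unfold Spec_solution solution solution_alt
  rw [show (PySem.Dict.ofList [("RT", (0:Int)), ("CF", 0), ("JM", 0), ("AN", 0)])
        = PySem.Dict.mk [("RT", 0), ("CF", 0), ("JM", 0), ("AN", 0)] by decide]
  rw [show (PySem.Dict.ofList [('R', (0:Int)), ('T', 0), ('C', 0), ('F', 0), ('J', 0), ('M', 0), ('A', 0), ('N', 0)])
        = PySem.Dict.mk [('R', 0), ('T', 0), ('C', 0), ('F', 0), ('J', 0), ('M', 0), ('A', 0), ('N', 0)] by decide]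
  rw [pvEnumFold0 pvStepA 0 survey choices _ (by simpa using hpre.1)]
  exact pvMain (survey.zip choices) 0 0 0 0 0 0 0 0 0 0 0 0
    (fun p hp => hpre.2 p.1 (List.of_mem_zip hp).1) rfl rfl rfl rfl
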